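-- pv_equiv track=rewrite | github.com/YofaGh/MangaScraper | modules/Coloredmanga.py | rename_chapter
-- ===== SOURCE A (Python) =====
-- def rename_chapter(chapter):
--     beginner = "Chapter"
--     if "volume" in chapter:
--         beginner = "Volume"
--     elif "number" in chapter:
--         beginner = "Number"
--     new_name = ""
--     reached_number = False
--     for ch in chapter:
--         if ch.isdigit():
--             new_name += ch
--             reached_number = True
--         elif ch in "-._" and reached_number and new_name[-1] != ".":
--             new_name += "."
--     if not reached_number:
--         return chapter
--     new_name = new_name.rstrip(".")
--     try:
--         return f"{beginner} {int(new_name):03d}"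
--     except ValueError:
--         return f"{beginner} {new_name.split('.', 1)[0].zfill(3)}.{new_name.split('.', 1)[1]}"
-- ===== SOURCE B (Python) =====
-- def rename_chapter(chapter):
--     beginner = "Chapter"
--     if "volume" in chapter:
--         beginner = "Volume"
--     elif "number" in chapter:
--         beginner = "Number"
--     i = next((k for k, c in enumerate(chapter) if c.isdigit()), None)
--     if i is None:
--         return chapter
--     kept = "".join("." if c in "-._" else c for c in chapter[i:] if c.isdigit() or c in "-._")
--     new_name = ".".join(p for p in kept.split(".") if p)
--     try:
--         return f"{beginner} {int(new_name):03d}"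
--     except ValueError:
--         return f"{beginner} {new_name.split('.', 1)[0].zfill(3)}.{new_name.split('.', 1)[1]}"
-- ===== Notes on version B (the rewrite author's own statement) =====
-- stated objective: idiomatic
-- what changed: Replaces the stateful character loop (accumulator string + reached_number flag + last-char peeking) by a declarative pipeline: find the first digit with enumerate/next, translate separators to dots while filtering in one comprehension, then split/join to collapse separator runs and trim trailing dots, keeping the try/except formatting tail.
import Mathlib
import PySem

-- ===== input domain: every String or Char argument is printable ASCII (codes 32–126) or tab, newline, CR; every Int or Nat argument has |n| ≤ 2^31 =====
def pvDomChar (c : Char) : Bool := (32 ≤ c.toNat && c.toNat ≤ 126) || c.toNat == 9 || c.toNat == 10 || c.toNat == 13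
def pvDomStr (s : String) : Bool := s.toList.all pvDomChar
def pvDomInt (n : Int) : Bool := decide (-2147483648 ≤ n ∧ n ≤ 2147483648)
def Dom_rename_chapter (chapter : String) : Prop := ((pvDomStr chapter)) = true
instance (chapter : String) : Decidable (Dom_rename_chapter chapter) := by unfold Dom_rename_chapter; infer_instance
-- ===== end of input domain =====

-- B replaces A's stateful character loop by an enumerate/filter + split/join pipeline (idiomatic; return value proven equal).

-- shared helpers: code that is textually identical in both Pythons
-- beginner = "Chapter" / "Volume" / "Number"  (same four lines in A and B)
def pvBeginner (chapter : String) : String :=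
  if PySem.Str.isIn "volume" chapter then "Volume"
  else if PySem.Str.isIn "number" chapter then "Number"
  else "Chapter"

-- ch in "-._"  : single-character 'in' on a string is membership in its characters (exact)
def pvIsSep (ch : Char) : Bool := ['-', '.', '_'].contains ch

-- the try/except tail, textually identical in A and B:
--   try: return f"{beginner} {int(new_name):03d}"
--   except ValueError: return f"{beginner} {new_name.split('.', 1)[0].zfill(3)}.{new_name.split('.', 1)[1]}"
-- int(new_name) → PySem.Int.ofChars? (none = ValueError); f"{n:03d}" = str(n).zfill(3) (exact: zfill keeps a sign in front);
-- new_name.split('.', 1) → splitOnMax; the [0]/[1] indexings are in range whenever the except branch runs (new_name contains '.'),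
-- getD is only a totalization.
def pvFinish (beginner : String) (nn : List Char) : String :=
  match PySem.Int.ofChars? nn with
  | some n => beginner ++ " " ++ String.ofList (PySem.Chars.zfill (PySem.Int.toChars n) 3)
  | none =>
      let parts := PySem.Chars.splitOnMax nn ['.'] 1
      beginner ++ " " ++ String.ofList (PySem.Chars.zfill (parts.getD 0 []) 3 ++ '.' :: parts.getD 1 [])

-- new_name.rstrip(".") — hand port (PySem.Chars.rstrip strips whitespace only): drop trailing '.'; exact
def pvRstripDot (nn : List Char) : List Char := (nn.reverse.dropWhile (· == '.')).reverse

-- ===== PORT A =====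
-- the loop body of A; new_name[-1] → pyGet? nn (-1) (reached_number guarantees nn ≠ [], so pyGet? is some last)
def pvStepA (st : List Char × Bool) (ch : Char) : List Char × Bool :=
  if PySem.Chars.isdigit ch then (st.1 ++ [ch], true)
  else if pvIsSep ch && st.2 && !(PySem.List.pyGet? st.1 (-1) == some '.') then (st.1 ++ ['.'], st.2)
  else st

def rename_chapter (chapter : String) : String :=
  let beginner := pvBeginner chapter
  let st := chapter.toList.foldl pvStepA ([], false)
  if !st.2 then chapter
  else pvFinish beginner (pvRstripDot st.1)

-- ===== PORT B =====
-- the generator expression "." if c in "-._" else c for c in tail if c.isdigit() or c in "-._"  as a filterMap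
def pvToDot? (c : Char) : Option Char :=
  if PySem.Chars.isdigit c || pvIsSep c then some (if pvIsSep c then '.' else c) else none

def rename_chapter_alt (chapter : String) : String :=
  let beginner := pvBeginner chapter
  let cs := chapter.toList
  -- i = next((k for k, c in enumerate(chapter) if c.isdigit()), None)
  match ((PySem.List.enumerate cs).filter (fun p => PySem.Chars.isdigit p.2)).head? with
  | none => chapter
  | some (i, _) =>
      let kept := (PySem.List.slice cs (some i) none).filterMap pvToDot?
      let nn := PySem.Chars.join ['.'] ((PySem.Chars.splitOn kept ['.']).filter (fun p => !p.isEmpty))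
      pvFinish beginner nn

-- ===== PRECONDITION & SPEC =====
def Spec_rename_chapter (chapter : String) (out : String) : Prop := out = rename_chapter_alt chapter
instance (chapter : String) (out : String) : Decidable (Spec_rename_chapter chapter out) := by unfold Spec_rename_chapter; infer_instance

-- ===== CLAIM (what is proved, stated in full; the proofs are below) =====
def Claim_equal_rename_chapter : Prop := ∀ (chapter : String), Dom_rename_chapter chapter → Spec_rename_chapter chapter (rename_chapter chapter)

-- ===== LEMMAS AND PROOFS =====

-- A's separator set never contains a digit, and '.' is not a digit
theorem pv_sep_not_digit {c : Char} (h : pvIsSep c = true) : PySem.Chars.isdigit c = false := by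
  simp [pvIsSep] at h
  rcases h with h | h | h <;> subst h <;> decide

theorem pv_digit_ne_dot {c : Char} (h : PySem.Chars.isdigit c = true) : c ≠ '.' := by
  intro hc; subst hc; simp [PySem.Chars.isdigit] at h

-- A's collapsed string (letters invisible; separator runs → one dot), as a recursion on the input
def pvColl (dotted : Bool) : List Char → List Char
  | [] => []
  | c :: r =>
      if PySem.Chars.isdigit c then c :: pvColl false r
      else if pvIsSep c then (if dotted then pvColl true r else '.' :: pvColl true r)
      else pvColl dotted r

-- structural single-char split (Python s.split(".")), accumulator form
def pvMsp (p : List Char) : List Char → List (List Char)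
  | [] => [p]
  | c :: r => if c == '.' then p :: pvMsp [] r else pvMsp (p ++ [c]) r

-- rstrip('.') cons equation
theorem pv_rstrip_cons (a : Char) (t : List Char) :
    pvRstripDot (a :: t) =
      if (pvRstripDot t).isEmpty then (if a == '.' then [] else [a]) else a :: pvRstripDot t := by
  simp only [pvRstripDot, List.reverse_cons, List.dropWhile_append]
  by_cases h : (t.reverse.dropWhile (· == '.')).isEmpty
  · by_cases ha : a = '.'
    · subst ha; simp [h, List.dropWhile]
    · simp [h, ha, List.dropWhile]
      rw [show (a == '.') = false by simp [ha]]
  · simp [h]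

theorem pv_rstrip_cons_ne {a : Char} (t : List Char) (h : a ≠ '.') :
    pvRstripDot (a :: t) = a :: pvRstripDot t := by
  rw [pv_rstrip_cons]
  by_cases he : (pvRstripDot t).isEmpty = true
  · rw [if_pos he, if_neg (by simp [h]), List.isEmpty_iff.mp he]
  · rw [if_neg he]

-- ===== A-side loop characterization =====

theorem pvA_prefix (pre : List Char) (h : ∀ c ∈ pre, PySem.Chars.isdigit c = false) :
    pre.foldl pvStepA ([], false) = ([], false) := by
  induction pre with
  | nil => rfl
  | cons c t ih =>
      have hc := h c (by simp)
      rw [show List.foldl pvStepA ([], false) (c :: t) = List.foldl pvStepA ([], false) t by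
        simp [pvStepA, hc]]
      exact ih (fun x hx => h x (by simp [hx]))

theorem pvA_phase2 (xs : List Char) :
    ∀ acc : List Char, acc ≠ [] →
      xs.foldl pvStepA (acc, true) = (acc ++ pvColl (acc.getLast? == some '.') xs, true) := by
  induction xs with
  | nil => intro acc h; simp [pvColl]
  | cons c r ih =>
      intro acc hacc
      by_cases hd : PySem.Chars.isdigit c = true
      · have hne : c ≠ '.' := pv_digit_ne_dot hd
        rw [show List.foldl pvStepA (acc, true) (c :: r) = List.foldl pvStepA (acc ++ [c], true) r by
          simp [pvStepA, hd]]
        rw [ih (acc ++ [c]) (by simp)]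
        simp [pvColl, hd]
        rw [show (c == '.') = false by simp [hne]]
      · have hd' : PySem.Chars.isdigit c = false := by simpa using hd
        by_cases hs : pvIsSep c = true
        · by_cases hdot : acc.getLast? = some '.'
          · -- last is '.', separator skipped
            have hget : PySem.List.pyGet? acc (-1) = some '.' := by
              rw [show PySem.List.pyGet? acc (-1) = acc.getLast? by simp [pysem]]; exact hdot
            rw [show List.foldl pvStepA (acc, true) (c :: r) = List.foldl pvStepA (acc, true) r by
              simp [pvStepA, hd', hs, hget]]
            rw [ih acc hacc]
            simp [pvColl, hd', hs, hdot]
          · have hget : ¬ (PySem.List.pyGet? acc (-1) = some '.') := by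
              rw [show PySem.List.pyGet? acc (-1) = acc.getLast? by simp [pysem]]; exact hdot
            rw [show List.foldl pvStepA (acc, true) (c :: r) = List.foldl pvStepA (acc ++ ['.'], true) r by
              simp [pvStepA, hd', hs, hget]]
            rw [ih (acc ++ ['.']) (by simp)]
            simp [pvColl, hd', hs, hdot]
        · have hs' : pvIsSep c = false := by simpa using hs
          rw [show List.foldl pvStepA (acc, true) (c :: r) = List.foldl pvStepA (acc, true) r by
            simp [pvStepA, hd', hs']]
          rw [ih acc hacc]
          simp [pvColl, hd', hs']

-- ===== B-side: first digit via enumerate =====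

theorem pvB_enum (cs : List Char) : ∀ s : Int,
    ((PySem.List.enumerate cs s).filter (fun p => PySem.Chars.isdigit p.2)).head? =
      match cs.dropWhile (fun c => !PySem.Chars.isdigit c) with
      | [] => none
      | d :: _ => some (s + ((cs.takeWhile (fun c => !PySem.Chars.isdigit c)).length : Int), d) := by
  induction cs with
  | nil => intro s; simp [PySem.List.enumerate]
  | cons c t ih =>
      intro s
      by_cases hd : PySem.Chars.isdigit c = true
      · simp [PySem.List.enumerate_cons, hd]
      · have hd' : PySem.Chars.isdigit c = false := by simpa using hd
        rw [PySem.List.enumerate_cons]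
        rw [show List.filter (fun p => PySem.Chars.isdigit p.2)
              ((s, c) :: PySem.List.enumerate t (s + 1))
            = List.filter (fun p => PySem.Chars.isdigit p.2) (PySem.List.enumerate t (s + 1)) by
          simp [hd']]
        rw [ih (s + 1)]
        cases hdw : t.dropWhile (fun c => !PySem.Chars.isdigit c) with
        | nil => simp [hd', hdw]
        | cons d r =>
            simp [hd', hdw]
            ring

-- drop (takeWhile.length) = dropWhile
theorem pv_drop_takeWhile (p : Char → Bool) (cs : List Char) :
    cs.drop (cs.takeWhile p).length = cs.dropWhile p := by
  induction cs with
  | nil => rfl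
  | cons c t ih =>
      by_cases hc : p c = true
      · simp [hc, ih]
      · simp [hc]

-- ===== splitOn = pvMsp =====

theorem pv_go_spec : ∀ (fuel : Nat) (l cur : List Char) (hacc : List (List Char)),
    l.length < fuel →
    PySem.Chars.splitOn.go ['.'] fuel l cur hacc = hacc.reverse ++ pvMsp cur.reverse l := by
  intro fuel
  induction fuel with
  | zero => intro l _ _ h; omega
  | succ n ih =>
      intro l cur hacc h
      cases l with
      | nil => simp [PySem.Chars.splitOn.go, pvMsp]
      | cons c r =>
          by_cases hc : c = '.'
          · subst hc
            rw [show PySem.Chars.splitOn.go ['.'] (n+1) ('.' :: r) cur hacc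
                  = PySem.Chars.splitOn.go ['.'] n (List.drop 1 ('.' :: r)) [] (cur.reverse :: hacc) by
                simp [PySem.Chars.splitOn.go, List.isPrefixOf]]
            rw [ih _ _ _ (by simpa using Nat.lt_of_succ_lt_succ h)]
            simp [pvMsp]
          · rw [show PySem.Chars.splitOn.go ['.'] (n+1) (c :: r) cur hacc
                  = PySem.Chars.splitOn.go ['.'] n r (c :: cur) hacc by
                simp [PySem.Chars.splitOn.go, List.isPrefixOf, Ne.symm hc]]
            rw [ih _ _ _ (by simpa using Nat.lt_of_succ_lt_succ h)]
            simp [pvMsp, hc]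

theorem pv_splitOn_eq (l : List Char) : PySem.Chars.splitOn l ['.'] = pvMsp [] l := by
  rw [PySem.Chars.splitOn, pv_go_spec (l.length + 1) l [] [] (by omega)]
  rfl

-- ===== the core correspondence: collapse-then-rstrip = split/filter/join =====

-- join with '.' of a nonempty head part
theorem pv_join_cons (p : List Char) (J : List (List Char)) :
    PySem.Chars.join ['.'] (p :: J) =
      if J.isEmpty then p else p ++ '.' :: PySem.Chars.join ['.'] J := by
  cases J with
  | nil => simp [PySem.Chars.join_singleton]
  | cons q l => rw [PySem.Chars.join_cons_cons]; simp

theorem pv_core : ∀ (n : Nat) (rest : List Char), rest.length ≤ n →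
    (∀ p : List Char, p ≠ [] →
      PySem.Chars.join ['.'] ((pvMsp p (rest.filterMap pvToDot?)).filter (fun q => !q.isEmpty))
        = p ++ pvRstripDot (pvColl false rest)) ∧
    (pvRstripDot ('.' :: pvColl true rest) =
      (if ((pvMsp [] (rest.filterMap pvToDot?)).filter (fun q => !q.isEmpty)).isEmpty then []
       else '.' :: PySem.Chars.join ['.']
              ((pvMsp [] (rest.filterMap pvToDot?)).filter (fun q => !q.isEmpty)))) := by
  intro n
  induction n with
  | zero =>
      intro rest h
      have : rest = [] := List.length_eq_zero_iff.mp (Nat.le_zero.mp h)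
      subst this
      constructor
      · intro p hp
        simp [pvMsp, pvColl, List.filter, hp, PySem.Chars.join_singleton, pvRstripDot]
      · simp [pvMsp, pvColl, List.filter, pvRstripDot, List.dropWhile]
  | succ n ih =>
      intro rest h
      cases rest with
      | nil => exact ih [] (by simp)
      | cons c r =>
          have hr : r.length ≤ n := by simpa using Nat.le_of_succ_le_succ h
          by_cases hd : PySem.Chars.isdigit c = true
          · -- digit character
            have hs : pvIsSep c = false := by
              cases hsep : pvIsSep c
              · rfl
              · exact absurd hd (by simp [pv_sep_not_digit hsep])
            have hne : c ≠ '.' := pv_digit_ne_dot hd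
            have hmap : (c :: r).filterMap pvToDot? = c :: r.filterMap pvToDot? := by
              simp [pvToDot?, hd, hs]
            constructor
            · intro p hp
              rw [hmap]
              show PySem.Chars.join ['.'] ((pvMsp p (c :: r.filterMap pvToDot?)).filter _) = _
              rw [show pvMsp p (c :: r.filterMap pvToDot?) = pvMsp (p ++ [c]) (r.filterMap pvToDot?) by
                simp [pvMsp, hne]]
              rw [(ih r hr).1 (p ++ [c]) (by simp)]
              simp [pvColl, hd, pv_rstrip_cons_ne _ hne]
            · rw [hmap]
              have h1 := (ih r hr).1 [c] (by simp)
              rw [show pvMsp [] (c :: r.filterMap pvToDot?) = pvMsp [c] (r.filterMap pvToDot?) by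
                simp [pvMsp, hne]]
              have hJne : ¬ ((pvMsp [c] (r.filterMap pvToDot?)).filter (fun q => !q.isEmpty)).isEmpty := by
                intro hcon
                rw [List.isEmpty_iff] at hcon
                rw [hcon] at h1
                simp [PySem.Chars.join_nil] at h1
              rw [if_neg hJne, h1]
              have hcoll : pvColl true (c :: r) = c :: pvColl false r := by simp [pvColl, hd]
              rw [hcoll, pv_rstrip_cons, pv_rstrip_cons_ne _ hne]
              simp
          · have hd' : PySem.Chars.isdigit c = false := by simpa using hd
            by_cases hs : pvIsSep c = true
            · -- separator character: maps to '.'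
              have hmap : (c :: r).filterMap pvToDot? = '.' :: r.filterMap pvToDot? := by
                simp [pvToDot?, hd', hs]
              constructor
              · intro p hp
                rw [hmap]
                rw [show pvMsp p ('.' :: r.filterMap pvToDot?) = p :: pvMsp [] (r.filterMap pvToDot?) by
                  simp [pvMsp]]
                rw [List.filter_cons_of_pos (by simpa using hp)]
                rw [pv_join_cons]
                have h2 := (ih r hr).2
                have hcoll : pvColl false (c :: r) = '.' :: pvColl true r := by
                  simp [pvColl, hd', hs]
                rw [hcoll, h2]
                by_cases hJ : ((pvMsp [] (r.filterMap pvToDot?)).filter (fun q => !q.isEmpty)).isEmpty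
                · simp [hJ]
                · simp [hJ]
              · rw [hmap]
                rw [show pvMsp [] ('.' :: r.filterMap pvToDot?) = [] :: pvMsp [] (r.filterMap pvToDot?) by
                  simp [pvMsp]]
                rw [List.filter_cons_of_neg (by simp)]
                have h2 := (ih r hr).2
                have hcoll : pvColl true (c :: r) = pvColl true r := by
                  simp [pvColl, hd', hs]
                rw [hcoll]
                exact h2
            · -- other character: invisible on both sides
              have hs' : pvIsSep c = false := by simpa using hs
              have hmap : (c :: r).filterMap pvToDot? = r.filterMap pvToDot? := by
                simp [pvToDot?, hd', hs']
              constructor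
              · intro p hp
                rw [hmap, (ih r hr).1 p hp]
                simp [pvColl, hd', hs']
              · rw [hmap]
                have h2 := (ih r hr).2
                have hcoll : pvColl true (c :: r) = pvColl true r := by
                  simp [pvColl, hd', hs']
                rw [hcoll]
                exact h2

-- ===== VERDICT (by name: the statement is the Claim_ definition above) =====
theorem rename_chapter_spec : Claim_equal_rename_chapter := by
  intro chapter _
  unfold Spec_rename_chapter rename_chapter rename_chapter_alt
  dsimp only
  set cs := chapter.toList with hcs
  have hsplit := List.takeWhile_append_dropWhile (p := fun c => !PySem.Chars.isdigit c) (l := cs)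
  have henum := pvB_enum cs 0
  cases hdw : cs.dropWhile (fun c => !PySem.Chars.isdigit c) with
  | nil =>
      -- no digit: A's loop never sets reached_number; B's next() finds nothing
      have hall : ∀ c ∈ cs, PySem.Chars.isdigit c = false := by
        have htw : cs.takeWhile (fun c => !PySem.Chars.isdigit c) = cs := by
          conv_rhs => rw [← hsplit]
          rw [hdw, List.append_nil]
        intro c hc
        rw [← htw] at hc
        simpa using List.mem_takeWhile_imp hc
      rw [pvA_prefix cs hall]
      rw [henum, hdw]
      simp
  | cons d rest =>
      have hd : PySem.Chars.isdigit d = true := by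
        have := List.head?_dropWhile_not (p := fun c => !PySem.Chars.isdigit c) cs
        rw [hdw] at this
        simpa using this
      -- A side
      have hA : cs.foldl pvStepA ([], false) = (d :: pvColl false rest, true) := by
        conv_lhs => rw [← hsplit]
        rw [List.foldl_append]
        rw [pvA_prefix (cs.takeWhile (fun c => !PySem.Chars.isdigit c))
              (fun x hx => by simpa using List.mem_takeWhile_imp hx)]
        rw [hdw]
        rw [show List.foldl pvStepA ([], false) (d :: rest) = List.foldl pvStepA ([d], true) rest by
          simp [pvStepA, hd]]
        rw [pvA_phase2 rest [d] (by simp)]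
        have : ([d] : List Char).getLast? = some d := rfl
        rw [this, show (some d == some '.') = false by simp [pv_digit_ne_dot hd]]
        simp
      rw [hA]
      -- B side
      rw [henum, hdw]
      rw [if_neg (by simp : ¬ ((!true) = true))]
      dsimp only
      have hslice : PySem.List.slice cs (some ((0 : Int) + ((cs.takeWhile (fun c => !PySem.Chars.isdigit c)).length : Int))) none
          = d :: rest := by
        rw [zero_add]
        rw [show PySem.List.slice cs (some ((cs.takeWhile (fun c => !PySem.Chars.isdigit c)).length : Int)) none
              = cs.drop (cs.takeWhile (fun c => !PySem.Chars.isdigit c)).length by simp [pysem]]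
        rw [pv_drop_takeWhile, hdw]
      rw [hslice]
      have hsepd : pvIsSep d = false := by
        cases hsep : pvIsSep d
        · rfl
        · exact absurd hd (by simp [pv_sep_not_digit hsep])
      have hkept : (d :: rest).filterMap pvToDot? = d :: rest.filterMap pvToDot? := by
        simp [pvToDot?, hd, hsepd]
      rw [hkept, pv_splitOn_eq]
      rw [show pvMsp [] (d :: rest.filterMap pvToDot?) = pvMsp [d] (rest.filterMap pvToDot?) by
        simp [pvMsp, pv_digit_ne_dot hd]]
      rw [(pv_core rest.length rest (le_refl _)).1 [d] (by simp)]
      rw [pv_rstrip_cons_ne _ (pv_digit_ne_dot hd)]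
      simp
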